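-- pv_equiv track=rewrite | github.com/Josstos1/TodoslosMetodosNumericos | Tercer-Parcial/RegresionPolinomial/Regresion-Polinomial.py | getMenorMatriz
-- ===== SOURCE A (Python) =====
-- def createMatriz(m,n,v):
--     C = []
--     for i in range(m):
--         C.append([])
--         for j in range(n):
--             C[i].append(v)
--
--     return C
--
-- def getDimensiones(A):
--     return (len(A),len(A[0]))
--
-- def getMenorMatriz(A,r,c):
--     m,n = getDimensiones(A)
--     C = createMatriz(m-1,n-1,0)
--     for i in range(m):
--         if i == r:
--             continue
--         for j in range(n):
--             if j == c:
--                 continue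
--             Ci = i
--             if i > r:
--                 Ci = i - 1
--             Cj = j
--             if j > c:
--                 Cj = j -1
--             C[Ci][Cj] = A[i][j]
--     return C
-- ===== SOURCE B (Python) =====
-- def getMenorMatriz(A, r, c):
--     m, n = len(A), len(A[0])
--     return [[A[i if i < r else i + 1][j if j < c else j + 1]
--              for j in range(n - 1)] for i in range(m - 1)]
-- ===== Notes on version B (the rewrite author's own statement) =====
-- stated objective: simpler
-- what changed: Replaces A's preallocated zero matrix filled by nested write loops with Ci/Cj shift arithmetic by a closed-form gather over the output's own indices: entry (i, j) of the result is read directly as A[i if i < r else i+1][j if j < c else j+1]; Pre_ excludes exactly the inputs on which A raises IndexError (empty matrix, out-of-range write targets, rows too short for the reads).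
import Mathlib
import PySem

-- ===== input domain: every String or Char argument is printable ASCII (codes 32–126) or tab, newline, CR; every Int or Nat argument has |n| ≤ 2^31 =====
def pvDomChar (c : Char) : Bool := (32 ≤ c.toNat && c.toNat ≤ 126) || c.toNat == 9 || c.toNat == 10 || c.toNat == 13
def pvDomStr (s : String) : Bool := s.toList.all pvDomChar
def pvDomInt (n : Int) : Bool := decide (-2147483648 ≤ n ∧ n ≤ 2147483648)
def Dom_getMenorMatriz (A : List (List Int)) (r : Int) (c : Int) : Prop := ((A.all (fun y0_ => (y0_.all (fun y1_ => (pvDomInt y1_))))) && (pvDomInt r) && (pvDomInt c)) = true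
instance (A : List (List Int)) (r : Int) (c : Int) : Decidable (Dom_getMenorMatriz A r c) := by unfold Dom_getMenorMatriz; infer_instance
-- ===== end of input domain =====

-- B computes the minor in closed form over the OUTPUT's indices — entry (i, j) of the result
-- is A[i + (i >= r)][j + (j >= c)] — instead of A's preallocated zero matrix filled by nested
-- write loops with Ci/Cj shift arithmetic; objective: simpler.


-- ===== PORT A =====
-- createMatriz: C.append([]) followed by the inner loop C[i].append(v) on that just-appended
-- last row is ported as appending the row the inner loop builds.
def pvCreateMatriz (m n : Int) (v : Int) : List (List Int) :=
  (PySem.List.pyRange 0 m 1).foldl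
    (fun C _i => C ++ [(PySem.List.pyRange 0 n 1).foldl (fun row _j => row ++ [v]) []]) []

def pvGetDimensiones (A : List (List Int)) : Int × Int :=
  ((A.length : Int), ((PySem.List.pyGetD A 0 []).length : Int))

def getMenorMatriz (A : List (List Int)) (r : Int) (c : Int) : List (List Int) :=
  let mn := pvGetDimensiones A
  let m := mn.1
  let n := mn.2
  let C0 := pvCreateMatriz (m - 1) (n - 1) 0
  (PySem.List.pyRange 0 m 1).foldl (fun C i =>
    if i = r then C
    else
      (PySem.List.pyRange 0 n 1).foldl (fun C j =>
        if j = c then C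
        else
          let Ci := if i > r then i - 1 else i
          let Cj := if j > c then j - 1 else j
          PySem.List.pySetD C Ci
            (PySem.List.pySetD (PySem.List.pyGetD C Ci []) Cj
              (PySem.List.pyGetD (PySem.List.pyGetD A i []) j 0))) C) C0

-- ===== PORT B =====
def getMenorMatriz_alt (A : List (List Int)) (r : Int) (c : Int) : List (List Int) :=
  let m : Int := (A.length : Int)
  let n : Int := ((PySem.List.pyGetD A 0 []).length : Int)
  (PySem.List.pyRange 0 (m - 1) 1).map (fun i =>
    (PySem.List.pyRange 0 (n - 1) 1).map (fun j =>
      PySem.List.pyGetD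
        (PySem.List.pyGetD A (if i < r then i else i + 1) [])
        (if j < c then j else j + 1) 0))

-- ===== PRECONDITION & SPEC =====
-- Pre_ is exactly the set of inputs on which the Python A returns normally: it excludes only
-- the inputs on which A raises (IndexError on the empty matrix, on write indices that fall
-- outside the preallocated (m-1)x(n-1) result, or on rows too short for the reads); when no
-- cell is ever visited (row 0 empty, or a single column with c = 0, or a single row with
-- r = 0) A returns without touching anything and those inputs stay inside Pre_.
def Pre_getMenorMatriz (A : List (List Int)) (r : Int) (c : Int) : Prop :=
  A ≠ [] ∧
  (((2 ≤ A.length ∨ r ≠ 0) ∧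
      1 ≤ (A.headD []).length ∧ (2 ≤ (A.headD []).length ∨ c ≠ 0)) →
    (r < (A.length : Int) ∧ (0 ≤ r ∨ 2 ≤ A.length) ∧
     c < ((A.headD []).length : Int) ∧ (0 ≤ c ∨ 2 ≤ (A.headD []).length) ∧
     ∀ i : Nat, i < A.length → (i : Int) ≠ r →
       ∀ j : Nat, j < (A.headD []).length → (j : Int) ≠ c → j < (A.getD i []).length))
instance (A : List (List Int)) (r : Int) (c : Int) : Decidable (Pre_getMenorMatriz A r c) := by
  unfold Pre_getMenorMatriz; infer_instance

def pvWitness_getMenorMatriz : List (List Int) × Int × Int := ([[1, 2], [3, 4]], 0, 0)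

def Spec_getMenorMatriz (A : List (List Int)) (r : Int) (c : Int) (out : List (List Int)) : Prop := out = getMenorMatriz_alt A r c
instance (A : List (List Int)) (r : Int) (c : Int) (out : List (List Int)) : Decidable (Spec_getMenorMatriz A r c out) := by unfold Spec_getMenorMatriz; infer_instance

-- ===== CLAIM (what is proved, stated in full; the proofs are below) =====
def Claim_equal_getMenorMatriz : Prop := ∀ (A : List (List Int)) (r : Int) (c : Int), Dom_getMenorMatriz A r c → Pre_getMenorMatriz A r c → Spec_getMenorMatriz A r c (getMenorMatriz A r c)

-- ===== LEMMAS AND PROOFS =====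

-- range(0,b) with index e removed
def pvSkip (e b : Nat) : List Int :=
  PySem.List.pyRange 0 (e : Int) 1 ++ PySem.List.pyRange ((e : Int) + 1) (b : Int) 1

-- generic loop invariant for a foldl over range(a, b)
theorem pv_foldl_pyRange_inv {α : Type} (step : α → Int → α) (S : Int → α) (b : Int) :
    ∀ (k : Nat) (a : Int), b - a = (k : Int) → (∀ t, a ≤ t → t < b → step (S t) t = S (t + 1)) →
    (PySem.List.pyRange a b 1).foldl step (S a) = S b := by
  intro k
  induction k with
  | zero =>
      intro a h0 _
      have hb : a = b := by omega
      subst hb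
      rw [PySem.List.pyRange_one_eq_nil (le_refl a)]
      rfl
  | succ k ih =>
      intro a h0 h
      have hlt : a < b := by omega
      rw [PySem.List.pyRange_one_cons hlt, List.foldl_cons, h a (le_refl a) hlt]
      exact ih (a + 1) (by omega) (fun t h1 h2 => h t (by omega) h2)

theorem pv_createMatriz_eq (m n : Int) (v : Int) :
    pvCreateMatriz m n v = List.replicate m.toNat (List.replicate n.toNat v) := by
  unfold pvCreateMatriz
  simp

theorem pv_getD_zero (A : List (List Int)) : PySem.List.pyGetD A 0 [] = A.headD [] := by
  rw [show (0 : Int) = ((0 : Nat) : Int) from rfl, PySem.List.pyGetD_natCast]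
  cases A with
  | nil => rfl
  | cons a t => rfl

theorem pv_skip_len (e b : Nat) (h : e < b) : (pvSkip e b).length = b - 1 := by
  simp [pvSkip, PySem.List.length_pyRange_one]
  omega

theorem pv_skip_get (e b k : Nat) (h : e < b) (hk : k < b - 1) :
    (pvSkip e b)[k]'(by rw [pv_skip_len e b h]; omega)
      = if k < e then (k : Int) else (k : Int) + 1 := by
  unfold pvSkip
  by_cases hke : k < e
  · rw [List.getElem_append_left (by simp [PySem.List.length_pyRange_one]; omega),
      PySem.List.getElem_pyRange_one, if_pos hke]
    omega
  · rw [List.getElem_append_right (by simp [PySem.List.length_pyRange_one]; omega),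
      PySem.List.getElem_pyRange_one, if_neg hke]
    simp [PySem.List.length_pyRange_one]
    omega

-- Python's xs[-1] = v on a nonempty list sets the last element
theorem pv_pySetD_neg_one {α : Type} (xs : List α) (v : α) (h : xs ≠ []) :
    PySem.List.pySetD xs (-1) v = xs.set (xs.length - 1) v := by
  unfold PySem.List.pySetD PySem.List.pySet? PySem.List.pyIdx?
  have h1 : ¬ (0 : Int) ≤ -1 := by omega
  have h2 : 0 < xs.length := List.length_pos_iff.mpr h
  have h3 : -(xs.length : Int) ≤ -1 := by omega
  rw [if_neg h1, if_pos h3]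
  simp

theorem pv_pyGetD_neg_one' {α : Type} (xs : List α) (d : α) (h : xs ≠ []) :
    PySem.List.pyGetD xs (-1) d = xs.getD (xs.length - 1) d := by
  unfold PySem.List.pyGetD PySem.List.pyGet? PySem.List.pyIdx?
  have h1 : ¬ (0 : Int) ≤ -1 := by omega
  have h2 : 0 < xs.length := List.length_pos_iff.mpr h
  have h3 : -(xs.length : Int) ≤ -1 := by omega
  rw [if_neg h1, if_pos h3]
  simp

-- writing the next correct value into the prefix-done/suffix-base list advances the prefix
theorem pv_set_mid {α : Type} (M base : List α) (w : Nat) (hw : w < M.length)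
    (hb : w < base.length) :
    (M.take w ++ base.drop w).set w (M[w]'hw) = M.take (w + 1) ++ base.drop (w + 1) := by
  apply List.ext_getElem
  · simp; omega
  · intro k h1 h2
    rw [List.getElem_set]
    by_cases hk : w = k
    · rw [if_pos hk]
      subst hk
      rw [List.getElem_append_left (by simp; omega), List.getElem_take]
    · rw [if_neg hk]
      by_cases hkw : k < w
      · rw [List.getElem_append_left (by simp; omega), List.getElem_append_left (by simp; omega)]
        simp [List.getElem_take]
      · rw [List.getElem_append_right (by simp; omega), List.getElem_append_right (by simp; omega)]
        simp only [List.getElem_drop]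
        congr 1
        simp
        omega

-- the inner j-loop only ever writes row Ci (a nonnegative index): one row replacement
theorem pv_fold_body (c : Int) (g : List Int → Int → List Int) (Ci : Nat) :
    ∀ (js : List Int) (C : List (List Int)), Ci < C.length →
    js.foldl (fun C j => if j = c then C
      else PySem.List.pySetD C (Ci : Int) (g (PySem.List.pyGetD C (Ci : Int) []) j)) C
    = PySem.List.pySetD C (Ci : Int)
        (js.foldl (fun row j => if j = c then row else g row j)
          (PySem.List.pyGetD C (Ci : Int) [])) := by
  intro js
  induction js with
  | nil =>
      intro C h
      simp only [List.foldl_nil, PySem.List.pySetD_natCast, PySem.List.pyGetD_natCast]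
      rw [List.getD_eq_getElem C [] h]
      exact (List.set_getElem_self h).symm
  | cons j js ih =>
      intro C h
      simp only [List.foldl_cons]
      by_cases hj : j = c
      · simp only [if_pos hj]
        exact ih C h
      · simp only [if_neg hj]
        rw [ih _ (by simpa using h)]
        simp only [PySem.List.pySetD_natCast, PySem.List.pyGetD_natCast]
        have hlen : Ci < ((C.set Ci (g (C.getD Ci []) j))).length := by simpa using h
        rw [List.getD_eq_getElem _ [] hlen, List.getElem_set_self hlen, List.set_set]

theorem pv_setD_getD_neg (C : List (List Int)) (x : List Int) (h : C ≠ []) :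
    PySem.List.pyGetD (PySem.List.pySetD C (-1) x) (-1) ([] : List Int) = x := by
  have hl : 0 < C.length := List.length_pos_iff.mpr h
  have hne : PySem.List.pySetD C (-1) x ≠ [] := by
    rw [pv_pySetD_neg_one C _ h]
    exact List.ne_nil_of_length_pos (by simpa using hl)
  rw [pv_pyGetD_neg_one' _ [] hne, pv_pySetD_neg_one C _ h, List.length_set,
    List.getD_eq_getElem _ _ (by simp; omega), List.getElem_set_self (by simp; omega)]

theorem pv_setD_setD_neg (C : List (List Int)) (x y : List Int) (h : C ≠ []) :
    PySem.List.pySetD (PySem.List.pySetD C (-1) x) (-1) y = PySem.List.pySetD C (-1) y := by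
  have hl : 0 < C.length := List.length_pos_iff.mpr h
  have hne : PySem.List.pySetD C (-1) x ≠ [] := by
    rw [pv_pySetD_neg_one C _ h]
    exact List.ne_nil_of_length_pos (by simpa using hl)
  rw [pv_pySetD_neg_one _ _ hne, pv_pySetD_neg_one C x h, pv_pySetD_neg_one C y h,
    List.length_set, List.set_set]

-- the inner j-loop writing row -1 (negative wraparound): one replacement of the last row
theorem pv_fold_body_neg (c : Int) (g : List Int → Int → List Int) :
    ∀ (js : List Int) (C : List (List Int)), C ≠ [] →
    js.foldl (fun C j => if j = c then C
      else PySem.List.pySetD C (-1) (g (PySem.List.pyGetD C (-1) []) j)) C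
    = PySem.List.pySetD C (-1)
        (js.foldl (fun row j => if j = c then row else g row j)
          (PySem.List.pyGetD C (-1) [])) := by
  intro js
  induction js with
  | nil =>
      intro C h
      have hl : 0 < C.length := List.length_pos_iff.mpr h
      simp only [List.foldl_nil]
      rw [pv_pySetD_neg_one C _ h, pv_pyGetD_neg_one' C [] h,
        List.getD_eq_getElem _ _ (by omega), List.set_getElem_self]
  | cons j js ih =>
      intro C h
      have hl : 0 < C.length := List.length_pos_iff.mpr h
      simp only [List.foldl_cons]
      by_cases hj : j = c
      · simp only [if_pos hj]
        exact ih C h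
      · simp only [if_neg hj]
        have hne : PySem.List.pySetD C (-1) (g (PySem.List.pyGetD C (-1) []) j) ≠ [] := by
          rw [pv_pySetD_neg_one C _ h]
          exact List.ne_nil_of_length_pos (by simpa using hl)
        rw [ih _ hne, pv_setD_getD_neg C _ h, pv_setD_setD_neg C _ _ h]

-- the j-loop on any base row of length n-1, c in range: gathers v j over pvSkip c n
theorem pv_row_inrange (v : Int → Int) (n CN : Nat) (hc : CN < n) (base : List Int)
    (hb : base.length = n - 1) :
    (PySem.List.pyRange 0 (n : Int) 1).foldl
      (fun row j => if j = (CN : Int) then row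
        else PySem.List.pySetD row (if j > (CN : Int) then j - 1 else j) (v j)) base
    = (pvSkip CN n).map v := by
  have hMlen : ((pvSkip CN n).map v).length = n - 1 := by
    rw [List.length_map, pv_skip_len CN n hc]
  have key := pv_foldl_pyRange_inv
    (fun row j => if j = (CN : Int) then row
      else PySem.List.pySetD row (if j > (CN : Int) then j - 1 else j) (v j))
    (fun t => ((pvSkip CN n).map v).take (if t ≤ (CN : Int) then t.toNat else t.toNat - 1)
      ++ base.drop (if t ≤ (CN : Int) then t.toNat else t.toNat - 1))
    (n : Int) n 0 (by omega) (by
      intro t h1 h2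
      by_cases htc : t = (CN : Int)
      · simp only [if_pos htc]
        have e1 : (if t ≤ (CN : Int) then t.toNat else t.toNat - 1) = CN := by
          split_ifs <;> omega
        have e2 : (if t + 1 ≤ (CN : Int) then (t + 1).toNat else (t + 1).toNat - 1) = CN := by
          split_ifs <;> omega
        rw [e1, e2]
      · simp only [if_neg htc]
        obtain ⟨w, hwdef⟩ : ∃ w : Nat,
            (if t ≤ (CN : Int) then t.toNat else t.toNat - 1) = w := ⟨_, rfl⟩
        have hwlt : w < n - 1 := by rw [← hwdef]; split_ifs <;> omega
        have hw1 : (if t > (CN : Int) then t - 1 else t) = ((w : Nat) : Int) := by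
          rw [← hwdef]; split_ifs <;> omega
        have hw2 : (if t + 1 ≤ (CN : Int) then (t + 1).toNat else (t + 1).toNat - 1)
            = w + 1 := by rw [← hwdef]; split_ifs <;> omega
        simp only [hwdef, hw1, hw2, PySem.List.pySetD_natCast]
        have hwM : w < ((pvSkip CN n).map v).length := by rw [hMlen]; exact hwlt
        have hidx : (pvSkip CN n)[w]'(by rw [pv_skip_len CN n hc]; omega) = t := by
          rw [pv_skip_get CN n w hc hwlt]
          rw [← hwdef] at hwlt ⊢
          split_ifs <;> omega
        have hval : v t = ((pvSkip CN n).map v)[w]'hwM := by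
          rw [List.getElem_map, hidx]
        rw [hval]
        exact pv_set_mid _ _ _ hwM (by omega))
  beta_reduce at key
  have hS0 : (if (0 : Int) ≤ (CN : Int) then (0 : Int).toNat else (0 : Int).toNat - 1) = 0 := by
    split_ifs <;> omega
  have hSn : (if (n : Int) ≤ (CN : Int) then (n : Int).toNat else (n : Int).toNat - 1)
      = n - 1 := by split_ifs <;> omega
  rw [hS0, hSn] at key
  simp only [List.take_zero, List.drop_zero, List.nil_append] at key
  rw [key, List.take_of_length_le (by omega), List.drop_of_length_le (by omega),
    List.append_nil]

-- the j-loop with c < 0: j > c always, so slots are j-1 with slot -1 first (wraparound);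
-- the first write lands on the last slot and is overwritten; result gathers columns 1..n-1
theorem pv_row_neg (v : Int → Int) (n : Nat) (hn : 2 ≤ n) (c : Int) (hcneg : c < 0)
    (base : List Int) (hb : base.length = n - 1) :
    (PySem.List.pyRange 0 (n : Int) 1).foldl
      (fun row j => if j = c then row
        else PySem.List.pySetD row (if j > c then j - 1 else j) (v j)) base
    = (pvSkip 0 n).map v := by
  have hbne : base ≠ [] := by
    intro hb0
    rw [hb0] at hb
    simp at hb
    omega
  have hMlen : ((pvSkip 0 n).map v).length = n - 1 := by
    rw [List.length_map, pv_skip_len 0 n (by omega)]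
  rw [PySem.List.pyRange_one_cons (show (0 : Int) < (n : Int) by omega), List.foldl_cons]
  rw [if_neg (show ¬ (0 : Int) = c by omega), if_pos (show (0 : Int) > c by omega),
    show (0 : Int) - 1 = -1 from rfl, pv_pySetD_neg_one base _ hbne]
  have hblen : (base.set (base.length - 1) (v 0)).length = n - 1 := by
    rw [List.length_set, hb]
  have key := pv_foldl_pyRange_inv
    (fun row j => if j = c then row
      else PySem.List.pySetD row (if j > c then j - 1 else j) (v j))
    (fun t => ((pvSkip 0 n).map v).take (t.toNat - 1)
      ++ (base.set (base.length - 1) (v 0)).drop (t.toNat - 1))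
    (n : Int) (n - 1) 1 (by omega) (by
      intro t h1 h2
      beta_reduce
      rw [if_neg (show ¬ t = c by omega), if_pos (show t > c by omega)]
      obtain ⟨w, hwdef⟩ : ∃ w : Nat, t.toNat - 1 = w := ⟨_, rfl⟩
      have hwlt : w < n - 1 := by omega
      rw [hwdef, show t - 1 = ((w : Nat) : Int) by omega,
        show (t + 1).toNat - 1 = w + 1 by omega, PySem.List.pySetD_natCast]
      have hwM : w < ((pvSkip 0 n).map v).length := by rw [hMlen]; exact hwlt
      have hidx : (pvSkip 0 n)[w]'(by rw [pv_skip_len 0 n (by omega)]; omega) = t := by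
        rw [pv_skip_get 0 n w (by omega) hwlt]
        rw [if_neg (by omega)]
        omega
      have hval : v t = ((pvSkip 0 n).map v)[w]'hwM := by
        rw [List.getElem_map, hidx]
      rw [hval]
      exact pv_set_mid _ _ _ hwM (by omega))
  beta_reduce at key
  rw [show ((1 : Int)).toNat - 1 = 0 from rfl] at key
  simp only [List.take_zero, List.drop_zero, List.nil_append] at key
  rw [show (0 : Int) + 1 = 1 from rfl, key, show ((n : Nat) : Int).toNat - 1 = n - 1 by omega,
    List.take_of_length_le (by omega), List.drop_of_length_le (by omega), List.append_nil]

-- the j-loop result, both c-cases, as a gather over pvSkip (effective deleted column)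
theorem pv_row_result (c : Int) (n : Nat) (hn : 1 ≤ n) (hc : c < (n : Int))
    (hc2 : 0 ≤ c ∨ 2 ≤ n) (v : Int → Int) (base : List Int) (hb : base.length = n - 1) :
    (PySem.List.pyRange 0 (n : Int) 1).foldl
      (fun row j => if j = c then row
        else PySem.List.pySetD row (if j > c then j - 1 else j) (v j)) base
    = (pvSkip (if c < 0 then 0 else c.toNat) n).map v := by
  by_cases hneg : c < 0
  · rw [if_pos hneg]
    exact pv_row_neg v n (by omega) c hneg base hb
  · rw [if_neg hneg, show c = ((c.toNat : Nat) : Int) by omega]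
    exact pv_row_inrange v n c.toNat (by omega) base hb

-- A's outer loop, 0 ≤ r < m
theorem pv_outer_inrange (A : List (List Int)) (R : Nat) (c : Int) (hR : R < A.length)
    (hn : 1 ≤ (A.headD []).length) (hc : c < ((A.headD []).length : Int))
    (hc2 : 0 ≤ c ∨ 2 ≤ (A.headD []).length) :
    getMenorMatriz A (R : Int) c
      = (pvSkip R A.length).map (fun i =>
          (pvSkip (if c < 0 then 0 else c.toNat) (A.headD []).length).map (fun j =>
            PySem.List.pyGetD (PySem.List.pyGetD A i []) j 0)) := by
  set m := A.length with hm
  set n := (A.headD []).length with hn'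
  set CN := if c < 0 then 0 else c.toNat with hCN
  have hCn : CN < n := by rw [hCN]; split_ifs <;> omega
  have hA0 := pv_getD_zero A
  set M := (pvSkip R m).map (fun i => (pvSkip CN n).map (fun j =>
    PySem.List.pyGetD (PySem.List.pyGetD A i []) j 0)) with hM
  set Z := List.replicate (m - 1) (List.replicate (n - 1) (0 : Int)) with hZ
  have hMlen : M.length = m - 1 := by
    rw [hM, List.length_map, pv_skip_len R m hR]
  have hMget : ∀ (k : Nat) (hk : k < M.length),
      M[k]'hk = (pvSkip CN n).map (fun j =>
        PySem.List.pyGetD (PySem.List.pyGetD A (if k < R then (k : Int) else (k : Int) + 1) []) j 0) := by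
    intro k hk
    rw [hMlen] at hk
    simp only [hM, List.getElem_map]
    rw [pv_skip_get R m k hR hk]
  have hkey := pv_foldl_pyRange_inv
    (fun C i =>
      if i = ((R : Nat) : Int) then C
      else (PySem.List.pyRange 0 ((n : Nat) : Int) 1).foldl
        (fun C j => if j = c then C
          else PySem.List.pySetD C (if i > ((R : Nat) : Int) then i - 1 else i)
            (PySem.List.pySetD
              (PySem.List.pyGetD C (if i > ((R : Nat) : Int) then i - 1 else i) [])
              (if j > c then j - 1 else j)
              (PySem.List.pyGetD (PySem.List.pyGetD A i []) j 0))) C)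
    (fun t => M.take (if t ≤ ((R : Nat) : Int) then t.toNat else t.toNat - 1)
      ++ Z.drop (if t ≤ ((R : Nat) : Int) then t.toNat else t.toNat - 1))
    ((m : Nat) : Int) m 0 (by omega) (by
      intro t h1 h2
      by_cases htr : t = ((R : Nat) : Int)
      · simp only [if_pos htr]
        have e1 : (if t ≤ ((R : Nat) : Int) then t.toNat else t.toNat - 1) = R := by
          split_ifs <;> omega
        have e2 : (if t + 1 ≤ ((R : Nat) : Int) then (t + 1).toNat else (t + 1).toNat - 1) = R := by
          split_ifs <;> omega
        rw [e1, e2]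
      · simp only [if_neg htr]
        obtain ⟨w, hwdef⟩ : ∃ w : Nat,
            (if t ≤ ((R : Nat) : Int) then t.toNat else t.toNat - 1) = w := ⟨_, rfl⟩
        have hwlt : w < m - 1 := by rw [← hwdef]; split_ifs <;> omega
        have hw1 : (if t > ((R : Nat) : Int) then t - 1 else t) = ((w : Nat) : Int) := by
          rw [← hwdef]; split_ifs <;> omega
        have hw2 : (if t + 1 ≤ ((R : Nat) : Int) then (t + 1).toNat else (t + 1).toNat - 1)
            = w + 1 := by rw [← hwdef]; split_ifs <;> omega
        simp only [hw1, hwdef, hw2]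
        rw [pv_fold_body c
          (fun row j => PySem.List.pySetD row (if j > c then j - 1 else j)
            (PySem.List.pyGetD (PySem.List.pyGetD A t []) j 0)) w _ _
          (by simp [hMlen, hZ]; omega)]
        have hgetz : PySem.List.pyGetD (M.take w ++ Z.drop w) ((w : Nat) : Int) []
            = List.replicate (n - 1) (0 : Int) := by
          rw [PySem.List.pyGetD_natCast,
            List.getD_eq_getElem _ [] (by simp [hMlen, hZ]; omega),
            List.getElem_append_right (by simp only [List.length_take, hMlen]; omega)]
          simp [hZ, hMlen]
        rw [hgetz, pv_row_result c n hn hc hc2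
          (fun j => PySem.List.pyGetD (PySem.List.pyGetD A t []) j 0) _ (by simp)]
        have hwM : w < M.length := by rw [hMlen]; exact hwlt
        have hidx : (if w < R then (w : Int) else (w : Int) + 1) = t := by
          rw [← hwdef] at hwlt ⊢
          split_ifs <;> omega
        have hval : (pvSkip CN n).map (fun j =>
            PySem.List.pyGetD (PySem.List.pyGetD A t []) j 0) = M[w]'hwM := by
          rw [hMget w hwM, hidx]
        rw [PySem.List.pySetD_natCast, hval, pv_set_mid M Z w hwM (by simp [hZ]; omega)])
  beta_reduce at hkey
  have e0 : (if (0 : Int) ≤ ((R : Nat) : Int) then (0 : Int).toNat else (0 : Int).toNat - 1) = 0 := by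
    split_ifs <;> omega
  have eN : (if ((m : Nat) : Int) ≤ ((R : Nat) : Int) then ((m : Nat) : Int).toNat
      else ((m : Nat) : Int).toNat - 1) = m - 1 := by split_ifs <;> omega
  rw [e0, eN] at hkey
  simp only [List.take_zero, List.drop_zero, List.nil_append] at hkey
  rw [List.take_of_length_le (by omega), List.drop_of_length_le (by simp [hZ]), List.append_nil] at hkey
  unfold getMenorMatriz pvGetDimensiones
  simp only [hA0]
  rw [pv_createMatriz_eq]
  have hm1 : (((m : Nat) : Int) - 1).toNat = m - 1 := by omega
  have hn1 : (((n : Nat) : Int) - 1).toNat = n - 1 := by omega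
  rw [hm1, hn1]
  exact hkey

-- A's outer loop, r < 0: every i is kept, slots are i-1 with slot -1 first (wraparound);
-- the first write lands on the last slot and is overwritten; result drops row 0
theorem pv_outer_neg (A : List (List Int)) (r : Int) (c : Int) (hr : r < 0)
    (hm : 2 ≤ A.length)
    (hn : 1 ≤ (A.headD []).length) (hc : c < ((A.headD []).length : Int))
    (hc2 : 0 ≤ c ∨ 2 ≤ (A.headD []).length) :
    getMenorMatriz A r c
      = (pvSkip 0 A.length).map (fun i =>
          (pvSkip (if c < 0 then 0 else c.toNat) (A.headD []).length).map (fun j =>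
            PySem.List.pyGetD (PySem.List.pyGetD A i []) j 0)) := by
  set m := A.length with hm
  set n := (A.headD []).length with hn'
  set CN := if c < 0 then 0 else c.toNat with hCN
  have hCn : CN < n := by rw [hCN]; split_ifs <;> omega
  have hA0 := pv_getD_zero A
  set M := (pvSkip 0 m).map (fun i => (pvSkip CN n).map (fun j =>
    PySem.List.pyGetD (PySem.List.pyGetD A i []) j 0)) with hM
  set Z := List.replicate (m - 1) (List.replicate (n - 1) (0 : Int)) with hZ
  have hZlen : Z.length = m - 1 := by rw [hZ, List.length_replicate]
  have hZne : Z ≠ [] := by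
    intro h0
    rw [h0] at hZlen
    simp at hZlen
    omega
  set G := (pvSkip CN n).map (fun j =>
    PySem.List.pyGetD (PySem.List.pyGetD A 0 []) j 0) with hG
  set Z' := Z.set (Z.length - 1) G with hZ'
  have hZ'len : Z'.length = m - 1 := by rw [hZ', List.length_set, hZlen]
  have hMlen : M.length = m - 1 := by
    rw [hM, List.length_map, pv_skip_len 0 m (by omega)]
  have hMget : ∀ (k : Nat) (hk : k < M.length),
      M[k]'hk = (pvSkip CN n).map (fun j =>
        PySem.List.pyGetD (PySem.List.pyGetD A ((k : Int) + 1) []) j 0) := by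
    intro k hk
    rw [hMlen] at hk
    simp only [hM, List.getElem_map]
    rw [pv_skip_get 0 m k (by omega) hk, if_neg (by omega)]
  unfold getMenorMatriz pvGetDimensiones
  simp only [hA0]
  rw [pv_createMatriz_eq,
    show (((m : Nat) : Int) - 1).toNat = m - 1 by omega,
    show (((n : Nat) : Int) - 1).toNat = n - 1 by omega, ← hZ]
  rw [PySem.List.pyRange_one_cons (show (0 : Int) < ((m : Nat) : Int) by omega),
    List.foldl_cons]
  rw [if_neg (show ¬ (0 : Int) = r by omega)]
  simp only [if_pos (show (0 : Int) > r by omega), show (0 : Int) - 1 = -1 from rfl]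
  rw [pv_fold_body_neg c
    (fun row j => PySem.List.pySetD row (if j > c then j - 1 else j)
      (PySem.List.pyGetD (PySem.List.pyGetD A 0 []) j 0)) _ Z hZne]
  have hbase0 : PySem.List.pyGetD Z (-1) ([] : List Int) = List.replicate (n - 1) (0 : Int) := by
    rw [pv_pyGetD_neg_one' Z [] hZne, hZ, List.length_replicate,
      List.getD_eq_getElem _ [] (by simp; omega), List.getElem_replicate]
  rw [hbase0, pv_row_result c n hn hc hc2
    (fun j => PySem.List.pyGetD (PySem.List.pyGetD A 0 []) j 0) _ (by simp),
    pv_pySetD_neg_one Z _ hZne, ← hG, ← hZ']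
  have hkey := pv_foldl_pyRange_inv
    (fun C i =>
      if i = r then C
      else (PySem.List.pyRange 0 ((n : Nat) : Int) 1).foldl
        (fun C j => if j = c then C
          else PySem.List.pySetD C (if i > r then i - 1 else i)
            (PySem.List.pySetD
              (PySem.List.pyGetD C (if i > r then i - 1 else i) [])
              (if j > c then j - 1 else j)
              (PySem.List.pyGetD (PySem.List.pyGetD A i []) j 0))) C)
    (fun t => M.take (t.toNat - 1) ++ Z'.drop (t.toNat - 1))
    ((m : Nat) : Int) (m - 1) 1 (by omega) (by
      intro t h1 h2
      beta_reduce
      rw [if_neg (show ¬ t = r by omega)]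
      simp only [if_pos (show t > r by omega)]
      obtain ⟨w, hwdef⟩ : ∃ w : Nat, t.toNat - 1 = w := ⟨_, rfl⟩
      have hwlt : w < m - 1 := by omega
      rw [hwdef, show t - 1 = ((w : Nat) : Int) by omega,
        show (t + 1).toNat - 1 = w + 1 by omega]
      have hstlen : w < (M.take w ++ Z'.drop w).length := by
        rw [List.length_append, List.length_take, List.length_drop, hMlen, hZ'len]
        omega
      rw [pv_fold_body c
        (fun row j => PySem.List.pySetD row (if j > c then j - 1 else j)
          (PySem.List.pyGetD (PySem.List.pyGetD A t []) j 0)) w _ _ hstlen]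
      have hTlen : (M.take w).length = w := by
        rw [List.length_take, hMlen]
        omega
      have hbget : PySem.List.pyGetD (M.take w ++ Z'.drop w) ((w : Nat) : Int) []
          = Z'[w]'(by rw [hZ'len]; omega) := by
        rw [PySem.List.pyGetD_natCast, List.getD_eq_getElem _ [] (by omega),
          List.getElem_append_right (by omega)]
        simp only [List.getElem_drop]
        congr 1
        omega
      have hblen : (Z'[w]'(by rw [hZ'len]; omega)).length = n - 1 := by
        simp only [hZ', List.getElem_set]
        split_ifs
        · rw [hG, List.length_map, pv_skip_len CN n hCn]
        · simp [hZ]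
      rw [hbget, pv_row_result c n hn hc hc2
        (fun j => PySem.List.pyGetD (PySem.List.pyGetD A t []) j 0) _ hblen]
      have hwM : w < M.length := by rw [hMlen]; exact hwlt
      have hval : (pvSkip CN n).map (fun j =>
          PySem.List.pyGetD (PySem.List.pyGetD A t []) j 0) = M[w]'hwM := by
        rw [hMget w hwM, show ((w : Nat) : Int) + 1 = t by omega]
      rw [PySem.List.pySetD_natCast, hval,
        pv_set_mid M Z' w hwM (by rw [hZ'len]; omega)])
  beta_reduce at hkey
  rw [show ((1 : Int)).toNat - 1 = 0 from rfl] at hkey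
  simp only [List.take_zero, List.drop_zero, List.nil_append] at hkey
  rw [show (0 : Int) + 1 = 1 from rfl, hkey,
    show (((m : Nat) : Int)).toNat - 1 = m - 1 by omega,
    List.take_of_length_le (by omega), List.drop_of_length_le (by omega), List.append_nil]

-- B as the same gather, under the case-3 bounds
theorem pv_altB (A : List (List Int)) (r : Int) (c : Int) (hm : 1 ≤ A.length)
    (hrm : r < (A.length : Int)) (hn : 1 ≤ (A.headD []).length)
    (hc : c < ((A.headD []).length : Int)) :
    getMenorMatriz_alt A r c
      = (pvSkip (if r < 0 then 0 else r.toNat) A.length).map (fun i =>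
          (pvSkip (if c < 0 then 0 else c.toNat) (A.headD []).length).map (fun j =>
            PySem.List.pyGetD (PySem.List.pyGetD A i []) j 0)) := by
  have hA0 := pv_getD_zero A
  unfold getMenorMatriz_alt
  simp only [hA0]
  have hRm : (if r < 0 then 0 else r.toNat) < A.length := by split_ifs <;> omega
  have hCn : (if c < 0 then 0 else c.toNat) < (A.headD []).length := by split_ifs <;> omega
  apply List.ext_getElem
  · rw [List.length_map, List.length_map, PySem.List.length_pyRange_one,
      pv_skip_len _ _ hRm]
    omega
  · intro k h1 h2
    have hk : k < A.length - 1 := by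
      rw [List.length_map, pv_skip_len _ _ hRm] at h2
      exact h2
    rw [List.getElem_map, List.getElem_map, PySem.List.getElem_pyRange_one,
      pv_skip_get _ _ k hRm hk]
    have hrow : (if 0 + (k : Int) < r then 0 + (k : Int) else 0 + (k : Int) + 1)
        = (if k < (if r < 0 then 0 else r.toNat) then (k : Int) else (k : Int) + 1) := by
      split_ifs <;> omega
    rw [hrow]
    apply List.ext_getElem
    · rw [List.length_map, List.length_map, PySem.List.length_pyRange_one,
        pv_skip_len _ _ hCn]
      omega
    · intro l hl1 hl2
      have hl : l < (A.headD []).length - 1 := by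
        rw [List.length_map, pv_skip_len _ _ hCn] at hl2
        exact hl2
      rw [List.getElem_map, List.getElem_map, PySem.List.getElem_pyRange_one,
        pv_skip_get _ _ l hCn hl]
      have hcol : (if 0 + (l : Int) < c then 0 + (l : Int) else 0 + (l : Int) + 1)
          = (if l < (if c < 0 then 0 else c.toNat) then (l : Int) else (l : Int) + 1) := by
        split_ifs <;> omega
      rw [hcol]

-- no cell is ever visited by the j-loop (row 0 empty, or single column with c = 0):
-- A returns its untouched preallocation, m-1 empty rows
theorem pv_deg_A (A : List (List Int)) (r : Int) (c : Int)
    (h : (A.headD []).length = 0 ∨ ((A.headD []).length = 1 ∧ c = 0)) :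
    getMenorMatriz A r c = List.replicate (A.length - 1) [] := by
  have hA0 := pv_getD_zero A
  unfold getMenorMatriz pvGetDimensiones
  simp only [hA0]
  have houter : ∀ (l : List Int) (C : List (List Int)),
      l.foldl (fun C i => if i = r then C
        else (PySem.List.pyRange 0 (((A.headD []).length : Nat) : Int) 1).foldl
          (fun C j => if j = c then C
            else PySem.List.pySetD C (if i > r then i - 1 else i)
              (PySem.List.pySetD (PySem.List.pyGetD C (if i > r then i - 1 else i) [])
                (if j > c then j - 1 else j)
                (PySem.List.pyGetD (PySem.List.pyGetD A i []) j 0))) C) C = C := by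
    intro l
    induction l with
    | nil => intro C; rfl
    | cons i t ih =>
        intro C
        rw [List.foldl_cons]
        by_cases hir : i = r
        · rw [if_pos hir]
          exact ih C
        · rw [if_neg hir]
          have hinner : (PySem.List.pyRange 0 (((A.headD []).length : Nat) : Int) 1).foldl
              (fun C j => if j = c then C
                else PySem.List.pySetD C (if i > r then i - 1 else i)
                  (PySem.List.pySetD (PySem.List.pyGetD C (if i > r then i - 1 else i) [])
                    (if j > c then j - 1 else j)
                    (PySem.List.pyGetD (PySem.List.pyGetD A i []) j 0))) C = C := by
            rcases h with h0 | ⟨h1, hc0⟩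
            · rw [h0]
              rw [show (((0 : Nat) : Int)) = 0 from rfl,
                PySem.List.pyRange_one_eq_nil (le_refl 0)]
              rfl
            · rw [h1, hc0]
              rw [show (((1 : Nat) : Int)) = 1 from rfl,
                PySem.List.pyRange_one_cons (by omega),
                PySem.List.pyRange_one_eq_nil (by omega)]
              simp
          rw [hinner]
          exact ih C
  rw [houter]
  rw [pv_createMatriz_eq,
    show (((A.length : Nat) : Int) - 1).toNat = A.length - 1 by omega,
    show ((((A.headD []).length : Nat) : Int) - 1).toNat = 0 by rcases h with h0 | ⟨h1, _⟩ <;> omega]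
  rfl

theorem pv_deg_B (A : List (List Int)) (r : Int) (c : Int) (hm : 1 ≤ A.length)
    (h : (A.headD []).length ≤ 1) :
    getMenorMatriz_alt A r c = List.replicate (A.length - 1) [] := by
  have hA0 := pv_getD_zero A
  unfold getMenorMatriz_alt
  simp only [hA0]
  rw [PySem.List.pyRange_one_eq_nil
    (show (((A.headD []).length : Nat) : Int) - 1 ≤ 0 by omega)]
  apply List.eq_replicate_iff.mpr
  constructor
  · rw [List.length_map, PySem.List.length_pyRange_one]
    omega
  · intro b hb
    rw [List.mem_map] at hb
    obtain ⟨i, _, hbi⟩ := hb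
    exact hbi.symm ▸ rfl

-- single-row matrix with r = 0: no row survives, both sides are []
theorem pv_m1_A (A : List (List Int)) (c : Int) (h : A.length = 1) :
    getMenorMatriz A 0 c = [] := by
  unfold getMenorMatriz pvGetDimensiones
  simp only [h, Nat.cast_one]
  have h01 : PySem.List.pyRange (0 : Int) 1 1 = [0] := by decide
  rw [h01]
  simp only [List.foldl_cons, List.foldl_nil]
  rw [pv_createMatriz_eq]
  norm_num

theorem pv_m1_B (A : List (List Int)) (c : Int) (h : A.length = 1) :
    getMenorMatriz_alt A 0 c = [] := by
  unfold getMenorMatriz_alt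
  simp only [h, Nat.cast_one]
  rw [show (1 : Int) - 1 = 0 from rfl, PySem.List.pyRange_one_eq_nil (le_refl 0)]
  rfl

-- ===== VERDICT (by name: the statement is the Claim_ definition above) =====
theorem getMenorMatriz_spec : Claim_equal_getMenorMatriz := by
  intro A r c _ hpre
  obtain ⟨hne, himp⟩ := hpre
  have hm1 : 1 ≤ A.length := List.length_pos_iff.mpr hne
  unfold Spec_getMenorMatriz
  by_cases hHJ : 1 ≤ (A.headD []).length ∧ (2 ≤ (A.headD []).length ∨ c ≠ 0)
  · by_cases hHI : 2 ≤ A.length ∨ r ≠ 0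
    · obtain ⟨hrm, hr2, hcn, hc2, _⟩ := himp ⟨hHI, hHJ⟩
      have hc2' : 0 ≤ c ∨ 2 ≤ (A.headD []).length := by omega
      by_cases hrneg : r < 0
      · have hm2 : 2 ≤ A.length := by omega
        rw [pv_outer_neg A r c hrneg hm2 hHJ.1 hcn hc2',
          pv_altB A r c hm1 hrm hHJ.1 hcn, if_pos hrneg]
      · rw [show r = ((r.toNat : Nat) : Int) by omega] at hrm ⊢
        rw [pv_outer_inrange A r.toNat c (by omega) hHJ.1 hcn hc2',
          pv_altB A ((r.toNat : Nat) : Int) c hm1 hrm hHJ.1 hcn,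
          if_neg (by omega : ¬ ((r.toNat : Nat) : Int) < 0), Int.toNat_natCast]
    · have hm : A.length = 1 := by omega
      have hr : r = 0 := by omega
      subst hr
      rw [pv_m1_A A c hm, pv_m1_B A c hm]
  · have h : (A.headD []).length = 0 ∨ ((A.headD []).length = 1 ∧ c = 0) := by
      by_cases h0 : (A.headD []).length = 0
      · exact Or.inl h0
      · right
        constructor
        · omega
        · by_contra hc0
          exact hHJ ⟨by omega, Or.inr hc0⟩
    rw [pv_deg_A A r c h, pv_deg_B A r c hm1 (by omega)]
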